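-- pv_equiv track=rewrite | github.com/lennardkorte/RouteLLM | hard_metrics/clarity.py | task_complexity
-- ===== SOURCE A (Python) =====
-- def task_complexity(text):
--     action_words = [
--         "explain", "describe", "list", "analyze", "summarize", "compare", "generate", "create", "define",
--         "evaluate", "discuss", "outline", "examine", "assess", "interpret", "classify", "categorize",
--         "justify", "identify", "demonstrate", "construct", "determine", "contrast", "review", "predict",
--         "support", "critique", "argue", "explore", "illustrate", "develop", "design", "formulate",
--         "solve", "organize", "prove", "synthesize", "exemplify", "debate", "rank"
--     ]
--     conjunctions = ["and", "or", ",", ";"]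
--
--     # Split text into words and lowercase them
--     words = text.lower().split()
--
--     # Count action words in the prompt
--     action_word_count = sum(1 for word in words if word in action_words)
--
--     # Count conjunctions and punctuation that may indicate multiple actions
--     conjunction_count = sum(1 for word in words if word in conjunctions)
--
--     # Estimate complexity based on action words and conjunctions
--     complexity_score = action_word_count + conjunction_count
--
--     # Return the complexity score and classification
--     return {
--         "Task Complexity Score": complexity_score,
--     }
-- ===== SOURCE B (Python) =====
-- def task_complexity(text):
--     action_words = [
--         "explain", "describe", "list", "analyze", "summarize", "compare", "generate", "create", "define",
--         "evaluate", "discuss", "outline", "examine", "assess", "interpret", "classify", "categorize",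
--         "justify", "identify", "demonstrate", "construct", "determine", "contrast", "review", "predict",
--         "support", "critique", "argue", "explore", "illustrate", "develop", "design", "formulate",
--         "solve", "organize", "prove", "synthesize", "exemplify", "debate", "rank"
--     ]
--     conjunctions = ["and", "or", ",", ";"]
--
--     # Build one frequency table of the words, then look up the fixed keyword lists.
--     freq = {}
--     for w in text.lower().split():
--         freq[w] = freq.get(w, 0) + 1
--
--     score = sum(freq.get(w, 0) for w in action_words + conjunctions)
--
--     return {"Task Complexity Score": score}
-- ===== Notes on version B (the rewrite author's own statement) =====
-- stated objective: idiomatic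
-- what changed: B builds a single frequency dictionary of the words in one pass and sums the lookups of the fixed action-word and conjunction key lists, instead of A's two membership-test scans over all words.
import Mathlib
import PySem

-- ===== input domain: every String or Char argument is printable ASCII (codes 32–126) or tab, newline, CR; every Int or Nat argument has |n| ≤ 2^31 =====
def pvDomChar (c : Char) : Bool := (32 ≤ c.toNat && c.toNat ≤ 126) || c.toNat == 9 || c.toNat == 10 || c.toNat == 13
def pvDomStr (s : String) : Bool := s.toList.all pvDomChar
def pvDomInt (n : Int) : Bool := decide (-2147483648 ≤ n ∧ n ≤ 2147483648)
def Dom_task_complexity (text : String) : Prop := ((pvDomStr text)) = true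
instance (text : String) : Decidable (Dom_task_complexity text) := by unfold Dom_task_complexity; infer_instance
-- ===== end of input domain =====

-- B builds one frequency table of the words and sums the lookups of the fixed key lists,
-- instead of A's two membership-test scans over all words (objective: idiomatic).

-- ===== PORT A =====
def pvActionWords : List String :=
  ["explain", "describe", "list", "analyze", "summarize", "compare", "generate", "create", "define",
   "evaluate", "discuss", "outline", "examine", "assess", "interpret", "classify", "categorize",
   "justify", "identify", "demonstrate", "construct", "determine", "contrast", "review", "predict",
   "support", "critique", "argue", "explore", "illustrate", "develop", "design", "formulate",
   "solve", "organize", "prove", "synthesize", "exemplify", "debate", "rank"]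

def pvConjunctions : List String := ["and", "or", ",", ";"]

def task_complexity (text : String) : List (String × Int) :=
  let words := PySem.Str.split₀ (PySem.Str.lower text)
  let action_word_count : Int :=
    words.foldl (fun acc w => if pvActionWords.contains w then acc + 1 else acc) 0
  let conjunction_count : Int :=
    words.foldl (fun acc w => if pvConjunctions.contains w then acc + 1 else acc) 0
  [("Task Complexity Score", action_word_count + conjunction_count)]

-- ===== PORT B =====
def task_complexity_alt (text : String) : List (String × Int) :=
  let freq : PySem.Dict String Int :=
    (PySem.Str.split₀ (PySem.Str.lower text)).foldl
      (fun d w => d.insert w (d.getD w 0 + 1)) PySem.Dict.empty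
  let score : Int := ((pvActionWords ++ pvConjunctions).map (fun w => freq.getD w 0)).sum
  [("Task Complexity Score", score)]

-- ===== PRECONDITION & SPEC =====
def Spec_task_complexity (text : String) (out : List (String × Int)) : Prop := out = task_complexity_alt text
instance (text : String) (out : List (String × Int)) : Decidable (Spec_task_complexity text out) := by unfold Spec_task_complexity; infer_instance

-- ===== CLAIM (what is proved, stated in full; the proofs are below) =====
def Claim_equal_task_complexity : Prop := ∀ (text : String), Dom_task_complexity text → Spec_task_complexity text (task_complexity text)

-- ===== LEMMAS AND PROOFS =====

-- countP of a disjunction of disjoint predicates splits into a sum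
theorem pv_countP_or_disjoint (ws : List String) (p q : String → Bool)
    (h : ∀ w, ¬(p w = true ∧ q w = true)) :
    ws.countP (fun w => p w || q w) = ws.countP p + ws.countP q := by
  induction ws with
  | nil => simp
  | cons x l ih =>
    simp only [List.countP_cons, ih]
    have := h x
    cases hp : p x <;> cases hq : q x <;> simp_all <;> omega

-- summing the multiplicities of a duplicate-free key list equals counting membership
theorem pv_sum_count_eq_countP (ws : List String) (L : List String) (hnd : L.Nodup) :
    ((L.map (fun w => ((ws.count w : Nat) : Int))).sum) = (ws.countP (fun w => L.contains w) : Int) := by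
  induction L with
  | nil => simp [List.countP_eq_zero.mpr]
  | cons a L ih =>
    rcases List.nodup_cons.mp hnd with ⟨ha, hL⟩
    have hsplit : ws.countP (fun w => (a :: L).contains w)
        = ws.countP (fun w => w == a) + ws.countP (fun w => L.contains w) := by
      have : (fun w => (a :: L).contains w) = (fun w => (w == a) || L.contains w) := by
        funext w; by_cases h : w = a <;> simp [h]
      rw [this]
      apply pv_countP_or_disjoint
      intro w ⟨h1, h2⟩
      exact ha (by simpa using (beq_iff_eq.mp h1) ▸ (by simpa using h2))
    simp only [List.map_cons, List.sum_cons, ih hL, hsplit]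
    have : ws.countP (fun w => w == a) = ws.count a := by
      simp [List.count]
    rw [this]
    push_cast
    ring

theorem pv_action_nodup : pvActionWords.Nodup := by decide
theorem pv_conj_nodup : pvConjunctions.Nodup := by decide
-- ===== VERDICT (by name: the statement is the Claim_ definition above) =====
theorem task_complexity_spec : Claim_equal_task_complexity := by
  intro text _
  unfold Spec_task_complexity task_complexity task_complexity_alt
  set ws := PySem.Str.split₀ (PySem.Str.lower text) with hws
  simp only [PySem.List.foldl_if_add_one, zero_add]
  have hfreq : ∀ w : String,
      (ws.foldl (fun d w => d.insert w (d.getD w 0 + 1)) PySem.Dict.empty).getD w 0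
        = (ws.count w : Int) := by
    intro w
    rw [PySem.Dict.getD_foldl_insert_add_one]
    simp [PySem.Dict.getD_empty]
  have hmap : ((pvActionWords ++ pvConjunctions).map
      (fun w => (ws.foldl (fun d w => d.insert w (d.getD w 0 + 1)) PySem.Dict.empty).getD w 0))
      = (pvActionWords ++ pvConjunctions).map (fun w => ((ws.count w : Nat) : Int)) := by
    apply List.map_congr_left; intro w _; exact hfreq w
  rw [hmap, List.map_append, List.sum_append,
    pv_sum_count_eq_countP ws pvActionWords pv_action_nodup,
    pv_sum_count_eq_countP ws pvConjunctions pv_conj_nodup]
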